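-- pv_equiv track=rewrite | github.com/lamoboos223/citus-sharding | active-active-deployment/active-active-demo.py | grouped_colocation
-- ===== SOURCE A (Python) =====
-- from collections import defaultdict
--
-- def grouped_colocation(ranges):
--     by_range = defaultdict(dict)
--     for (tbl, sid), rng in ranges.items():
--         by_range[rng][tbl] = sid
--     ordered = []
--     for idx, (rng, mapping) in enumerate(sorted(by_range.items(), key=lambda x: x[0])):
--         ordered.append(
--             (idx + 1, mapping)
--         )  # e.g. (1, {'rooms':102008,'room_members':102012,'messages':102016})
--     return ordered
-- ===== SOURCE B (Python) =====
-- def grouped_colocation(ranges):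
--     # sort-then-group: stable-sort the items by range, then walk once,
--     # cutting consecutive runs of equal range into (index, {tbl: sid}) groups
--     items = sorted(ranges.items(), key=lambda kv: kv[1])
--     ordered = []
--     i = 0
--     n = len(items)
--     while i < n:
--         rng = items[i][1]
--         mapping = {}
--         j = i
--         while j < n and items[j][1] == rng:
--             (tbl, sid) = items[j][0]
--             mapping[tbl] = sid
--             j += 1
--         ordered.append((len(ordered) + 1, mapping))
--         i = j
--     return ordered
-- ===== Notes on version B (the rewrite author's own statement) =====
-- stated objective: alternative
-- what changed: A groups items into a defaultdict-of-dicts keyed by range and then sorts the grouped items; B stable-sorts the items by range once and walks the sorted sequence sequentially, cutting runs of equal range into groups, so the intermediate hash grouping disappears.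
import Mathlib
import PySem

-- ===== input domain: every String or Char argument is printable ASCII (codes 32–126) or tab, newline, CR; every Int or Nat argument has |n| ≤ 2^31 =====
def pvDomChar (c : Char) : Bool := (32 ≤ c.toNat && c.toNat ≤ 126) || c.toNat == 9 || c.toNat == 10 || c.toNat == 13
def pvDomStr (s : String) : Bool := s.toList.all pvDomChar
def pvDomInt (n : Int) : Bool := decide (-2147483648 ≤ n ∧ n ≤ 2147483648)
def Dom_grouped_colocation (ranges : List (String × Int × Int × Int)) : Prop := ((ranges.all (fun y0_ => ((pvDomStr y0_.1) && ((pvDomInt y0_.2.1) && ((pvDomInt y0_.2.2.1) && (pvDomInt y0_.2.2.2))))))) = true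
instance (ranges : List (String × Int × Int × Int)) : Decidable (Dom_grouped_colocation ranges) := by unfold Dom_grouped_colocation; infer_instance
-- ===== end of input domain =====

-- B replaces A's hash-group-then-sort (defaultdict of dicts, then sorted) by a stable
-- sort of the items followed by a single sequential walk cutting runs of equal range
-- (objective: alternative decomposition, same asymptotic cost).


-- ===== PORT A =====
-- marshalling of the dict argument (shared by both ports): the association list becomes
-- a Python dict keyed by (tbl, sid); its .items() is what both Pythons iterate over
def gcPyDict (ranges : List (String × Int × Int × Int)) : PySem.Dict (String × Int) (Int × Int) :=
  PySem.Dict.ofList (ranges.map (fun r => ((r.1, r.2.1), (r.2.2.1, r.2.2.2))))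

-- A: by_range = defaultdict(dict); by_range[rng][tbl] = sid; then sorted(items, key=rng), enumerate
def grouped_colocation (ranges : List (String × Int × Int × Int)) : List (Int × (List (String × Int))) :=
  let byRange : PySem.Dict (Int × Int) (PySem.Dict String Int) :=
    (gcPyDict ranges).items.foldl
      (fun d p => d.modify p.2 PySem.Dict.empty (fun m => m.insert p.1.1 p.1.2)) PySem.Dict.empty
  (PySem.List.enumerate (PySem.List.sorted2 byRange.items (fun x => x.1.1) (fun x => x.1.2))).map
    (fun q => (q.1 + 1, q.2.2.items))

-- ===== PORT B =====
-- B's inner walk: cut the (already sorted) item list into runs of equal range,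
-- building the {tbl: sid} dict of each run
def gcGroups : List ((String × Int) × (Int × Int)) → List (List (String × Int))
  | [] => []
  | p :: rest =>
    (((p :: rest.takeWhile (fun q => q.2 == p.2)).foldl
        (fun m q => m.insert q.1.1 q.1.2) (PySem.Dict.empty : PySem.Dict String Int)).items)
      :: gcGroups (rest.dropWhile (fun q => q.2 == p.2))
  termination_by l => l.length
  decreasing_by simpa using Nat.lt_succ_of_le (List.length_dropWhile_le _ _)

-- B: items = sorted(ranges.items(), key=value); walk once cutting runs; enumerate
def grouped_colocation_alt (ranges : List (String × Int × Int × Int)) : List (Int × (List (String × Int))) :=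
  (PySem.List.enumerate (gcGroups (PySem.List.sorted2 (gcPyDict ranges).items (fun p => p.2.1) (fun p => p.2.2)))).map
    (fun q => (q.1 + 1, q.2))

-- ===== PRECONDITION & SPEC =====
def Spec_grouped_colocation (ranges : List (String × Int × Int × Int)) (out : List (Int × (List (String × Int)))) : Prop := out = grouped_colocation_alt ranges
instance (ranges : List (String × Int × Int × Int)) (out : List (Int × (List (String × Int)))) : Decidable (Spec_grouped_colocation ranges out) := by unfold Spec_grouped_colocation; infer_instance

-- ===== CLAIM (what is proved, stated in full; the proofs are below) =====
def Claim_equal_grouped_colocation : Prop := ∀ (ranges : List (String × Int × Int × Int)), Dom_grouped_colocation ranges → Spec_grouped_colocation ranges (grouped_colocation ranges)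

-- ===== LEMMAS AND PROOFS =====

-- the lexicographic key both Pythons sort by (a tuple key in Python)
def gcKey (p : (String × Int) × (Int × Int)) : Lex (Int × Int) := toLex p.2

-- the dict built from one class of items
def gcDictOf (l : List ((String × Int) × (Int × Int))) : PySem.Dict String Int :=
  l.foldl (fun m q => m.insert q.1.1 q.1.2) PySem.Dict.empty

-- the run keys B's walk visits, in order
def gcKeyRuns : List ((String × Int) × (Int × Int)) → List (Int × Int)
  | [] => []
  | p :: rest => p.2 :: gcKeyRuns (rest.dropWhile (fun q => q.2 == p.2))
  termination_by l => l.length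
  decreasing_by simpa using Nat.lt_succ_of_le (List.length_dropWhile_le _ _)

-- a sorted2 with two Int keys is sorted with the lexicographic key
lemma key_bool (k1a k1b k2a k2b : Int) :
    (decide (k1a < k1b) || !decide (k1b < k1a) && decide (k2a < k2b)) =
      decide (toLex (k1a, k2a) < toLex (k1b, k2b)) := by
  rw [Bool.eq_iff_iff]
  simp [Prod.Lex.toLex_lt_toLex]
  omega

lemma sorted2_eq_sorted_toLex {α : Type} (xs : List α) (k1 k2 : α → Int) :
    PySem.List.sorted2 xs k1 k2 = PySem.List.sorted xs (fun a => toLex (k1 a, k2 a)) := by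
  unfold PySem.List.sorted2 PySem.List.sorted
  simp only [if_neg (by decide : ¬ (false = true))]
  congr 1
  funext acc x
  congr 1
  funext a b
  exact key_bool (k1 a) (k1 b) (k2 a) (k2 b)

-- general fold law: getD after a foldl-of-modify is a foldl over the filtered class
lemma getD_foldl_modify_filter {κ ν β : Type} [BEq κ] [LawfulBEq κ] [DecidableEq κ]
    (l : List β) (key : β → κ) (d0 : ν) (g : ν → β → ν) (d : PySem.Dict κ ν) (c : κ) :
    (l.foldl (fun d x => d.modify (key x) d0 (fun v => g v x)) d).getD c d0 =
      (l.filter (fun x => key x == c)).foldl g (d.getD c d0) := by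
  induction l generalizing d with
  | nil => rfl
  | cons x t ih =>
    simp only [List.foldl_cons, List.filter_cons]
    rw [ih]
    by_cases h : key x = c
    · simp [h]
    · simp [h, PySem.Dict.getD_modify, Ne.symm h]

-- A's by_range.items, characterised
lemma byRange_items (xs : List ((String × Int) × (Int × Int))) :
    (xs.foldl (fun d p => d.modify p.2 PySem.Dict.empty (fun m => m.insert p.1.1 p.1.2))
        (PySem.Dict.empty : PySem.Dict (Int × Int) (PySem.Dict String Int))).items =
      (PySem.Set.ofList (xs.map (·.2))).map
        (fun r => (r, gcDictOf (xs.filter (fun p => p.2 == r)))) := by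
  have hkeys := PySem.Dict.keys_foldl_modify_key (l := xs) (key := fun p => p.2)
      (d0 := (PySem.Dict.empty : PySem.Dict String Int))
      (f := fun _ p => fun m => m.insert p.1.1 p.1.2) (d := PySem.Dict.empty)
  rw [PySem.Dict.keys_empty, PySem.Set.update_nil_left] at hkeys
  have hnodup : (xs.foldl (fun d p => d.modify p.2 PySem.Dict.empty (fun m => m.insert p.1.1 p.1.2))
      (PySem.Dict.empty : PySem.Dict (Int × Int) (PySem.Dict String Int))).keys.Nodup :=
    PySem.Dict.nodup_keys_foldl_modify_key _ _ _ _ _ PySem.Dict.nodup_keys_empty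
  rw [PySem.Dict.items_eq_map_keys _ hnodup PySem.Dict.empty, hkeys]
  apply List.map_congr_left
  intro r _
  have := getD_foldl_modify_filter (l := xs) (key := fun p => p.2)
      (d0 := (PySem.Dict.empty : PySem.Dict String Int))
      (g := fun m q => m.insert q.1.1 q.1.2) (d := PySem.Dict.empty) (c := r)
  rw [PySem.Dict.getD_empty] at this
  simp only [this, gcDictOf]

-- sorting a nodup-keyed map list sorts the keys
lemma sorted_map_pair {β : Type} (R : List (Int × Int)) (f : (Int × Int) → β) (hR : R.Nodup) :
    PySem.List.sorted (R.map (fun r => (r, f r))) (fun x => toLex x.1) =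
      (PySem.List.sorted R (fun r => toLex r)).map (fun r => (r, f r)) := by
  apply PySem.List.sorted_eq_of_perm_of_pairwise_lt
  · exact (PySem.List.sorted_perm R _ false).map _
  · have hle := PySem.List.sorted_pairwise R (fun r => toLex r)
    have hnd : (PySem.List.sorted R (fun r => toLex r)).Nodup :=
      ((PySem.List.sorted_perm R _ false).nodup_iff).mpr hR
    have hlt : (PySem.List.sorted R (fun r => toLex r)).Pairwise
        (fun a b => toLex a < toLex b) := by
      refine (hle.and hnd).imp ?_
      rintro a b ⟨h1, h2⟩
      exact lt_of_le_of_ne h1 (by simpa using h2)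
    exact hlt.map _ (by intro a b h; simpa using h)

-- stability of one insertion, away from and at its own key class
lemma filter_insertBy_ne (x : (String × Int) × (Int × Int)) (acc : List ((String × Int) × (Int × Int)))
    (r : Int × Int) (h : x.2 ≠ r) :
    (PySem.List.insertBy (fun a b => decide (gcKey a < gcKey b)) x acc).filter (fun p => p.2 == r) =
      acc.filter (fun p => p.2 == r) := by
  induction acc with
  | nil => simp [PySem.List.insertBy, h]
  | cons y ys ih =>
    rw [PySem.List.insertBy]
    split
    · simp [List.filter_cons, h]
    · simp only [List.filter_cons]
      rw [ih]

lemma filter_insertBy_self (x : (String × Int) × (Int × Int)) (acc : List ((String × Int) × (Int × Int)))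
    (hacc : acc.Pairwise (fun a b => gcKey a ≤ gcKey b)) :
    (PySem.List.insertBy (fun a b => decide (gcKey a < gcKey b)) x acc).filter (fun p => p.2 == x.2) =
      acc.filter (fun p => p.2 == x.2) ++ [x] := by
  induction acc with
  | nil => simp [PySem.List.insertBy]
  | cons y ys ih =>
    rw [PySem.List.insertBy]
    rcases List.pairwise_cons.mp hacc with ⟨hy, hys⟩
    split
    · rename_i hlt
      have hxy : gcKey x < gcKey y := of_decide_eq_true hlt
      have hclass : ∀ q ∈ y :: ys, ¬ (q.2 == x.2) = true := by
        intro q hq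
        have hyq : gcKey y ≤ gcKey q := by
          rcases hq with _ | hq
          · exact le_refl _
          · exact hy q (by assumption)
        have : gcKey x < gcKey q := lt_of_lt_of_le hxy hyq
        simp only [beq_iff_eq]
        intro hq2
        rw [gcKey, gcKey, hq2] at this
        exact lt_irrefl _ this
      rw [List.filter_cons_of_pos (by simp), List.filter_eq_nil_iff.mpr hclass]
      rfl
    · simp only [List.filter_cons]
      rw [ih hys]
      split <;> rfl

-- the stable sort leaves each key class in input order
lemma filter_foldl_insertBy (xs : List ((String × Int) × (Int × Int))) (r : Int × Int) :
    ∀ acc, acc.Pairwise (fun a b => gcKey a ≤ gcKey b) →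
    (xs.foldl (fun acc x => PySem.List.insertBy (fun a b => decide (gcKey a < gcKey b)) x acc) acc).filter
        (fun p => p.2 == r) =
      acc.filter (fun p => p.2 == r) ++ xs.filter (fun p => p.2 == r) := by
  induction xs with
  | nil => intro acc _; simp
  | cons x t ih =>
    intro acc hacc
    simp only [List.foldl_cons, List.filter_cons]
    rw [ih _ (PySem.List.insertBy_pairwise_le gcKey x acc hacc)]
    by_cases h : x.2 = r
    · subst h
      rw [filter_insertBy_self x acc hacc]
      simp
    · rw [filter_insertBy_ne x acc r h]
      simp [h]

lemma sorted_filter_class (xs : List ((String × Int) × (Int × Int))) (r : Int × Int) :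
    (PySem.List.sorted xs gcKey).filter (fun p => p.2 == r) = xs.filter (fun p => p.2 == r) := by
  rw [PySem.List.sorted_eq_foldl_insertBy]
  simpa using filter_foldl_insertBy xs r [] (List.Pairwise.nil)

lemma takeWhile_class_eq_filter (p : (String × Int) × (Int × Int)) :
    ∀ rest : List ((String × Int) × (Int × Int)),
      (∀ q ∈ rest, gcKey p ≤ gcKey q) → rest.Pairwise (fun a b => gcKey a ≤ gcKey b) →
      rest.filter (fun q => q.2 == p.2) = rest.takeWhile (fun q => q.2 == p.2) := by
  intro rest
  induction rest with
  | nil => intro _ _; rfl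
  | cons y t ih =>
    intro hge hpw
    rcases List.pairwise_cons.mp hpw with ⟨hy, ht⟩
    by_cases h : y.2 = p.2
    · rw [List.filter_cons_of_pos (by simp [h]), List.takeWhile_cons_of_pos (by simp [h])]
      rw [ih (fun q hq => hge q (List.mem_cons_of_mem _ hq)) ht]
    · have hpy : gcKey p < gcKey y :=
        lt_of_le_of_ne (hge y (List.mem_cons_self))
          (by simp only [gcKey]; intro hc; exact h (by simpa using (toLex_inj.mp hc.symm)))
      rw [List.takeWhile_cons_of_neg (by simp [h]), List.filter_cons_of_neg (by simp [h])]
      apply List.filter_eq_nil_iff.mpr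
      intro q hq
      have : gcKey p < gcKey q := lt_of_lt_of_le hpy (hy q hq)
      simp only [beq_iff_eq]
      intro hc
      rw [gcKey, gcKey, hc] at this
      exact lt_irrefl _ this

lemma dropWhile_key_gt (p : (String × Int) × (Int × Int)) :
    ∀ rest : List ((String × Int) × (Int × Int)),
      (∀ q ∈ rest, gcKey p ≤ gcKey q) → rest.Pairwise (fun a b => gcKey a ≤ gcKey b) →
      ∀ q ∈ rest.dropWhile (fun q => q.2 == p.2), gcKey p < gcKey q := by
  intro rest
  induction rest with
  | nil => intro _ _ q hq; simp at hq
  | cons y t ih =>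
    intro hge hpw
    rcases List.pairwise_cons.mp hpw with ⟨hy, ht⟩
    by_cases h : y.2 = p.2
    · rw [List.dropWhile_cons_of_pos (by simp [h])]
      exact ih (fun q hq => hge q (List.mem_cons_of_mem _ hq)) ht
    · rw [List.dropWhile_cons_of_neg (by simp [h])]
      have hpy : gcKey p < gcKey y :=
        lt_of_le_of_ne (hge y (List.mem_cons_self))
          (by simp only [gcKey]; intro hc; exact h (by simpa using (toLex_inj.mp hc.symm)))
      intro q hq
      rcases List.mem_cons.mp hq with rfl | hq
      · exact hpy
      · exact lt_of_lt_of_le hpy (hy q hq)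

lemma mem_gcKeyRuns (l : List ((String × Int) × (Int × Int))) (r : Int × Int) :
    r ∈ gcKeyRuns l ↔ r ∈ l.map (·.2) := by
  induction l using gcKeyRuns.induct with
  | case1 => simp [gcKeyRuns]
  | case2 p rest ih =>
    rw [gcKeyRuns]
    have hsplit : rest = rest.takeWhile (fun q => q.2 == p.2) ++ rest.dropWhile (fun q => q.2 == p.2) :=
      (List.takeWhile_append_dropWhile).symm
    constructor
    · intro h
      rcases List.mem_cons.mp h with rfl | h
      · simp
      · have := ih.mp h
        rcases List.mem_map.mp this with ⟨q, hq, rfl⟩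
        exact List.mem_map_of_mem (List.mem_cons_of_mem _ ((List.dropWhile_sublist _).mem hq))
    · intro h
      rcases List.mem_map.mp h with ⟨q, hq, rfl⟩
      rcases List.mem_cons.mp hq with rfl | hq
      · exact List.mem_cons_self
      · rw [hsplit] at hq
        rcases List.mem_append.mp hq with hq | hq
        · have := List.mem_takeWhile_imp hq
          simp only [beq_iff_eq] at this
          rw [this]; exact List.mem_cons_self
        · exact List.mem_cons_of_mem _ (ih.mpr (List.mem_map_of_mem hq))

lemma gcKeyRuns_pairwise (l : List ((String × Int) × (Int × Int)))
    (hl : l.Pairwise (fun a b => gcKey a ≤ gcKey b)) :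
    (gcKeyRuns l).Pairwise (fun a b => toLex a < toLex b) := by
  induction l using gcKeyRuns.induct with
  | case1 => simp [gcKeyRuns]
  | case2 p rest ih =>
    rcases List.pairwise_cons.mp hl with ⟨hp, hrest⟩
    have hrest' : (rest.dropWhile (fun q => q.2 == p.2)).Pairwise (fun a b => gcKey a ≤ gcKey b) :=
      List.Pairwise.sublist (List.dropWhile_sublist _) hrest
    rw [gcKeyRuns]
    refine List.pairwise_cons.mpr ⟨?_, ih hrest'⟩
    intro r hr
    rcases List.mem_map.mp ((mem_gcKeyRuns _ r).mp hr) with ⟨q, hq, rfl⟩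
    exact dropWhile_key_gt p rest hp hrest q hq

lemma gcGroups_eq (l : List ((String × Int) × (Int × Int)))
    (hl : l.Pairwise (fun a b => gcKey a ≤ gcKey b)) :
    gcGroups l = (gcKeyRuns l).map (fun r => (gcDictOf (l.filter (fun p => p.2 == r))).items) := by
  induction l using gcGroups.induct with
  | case1 => simp [gcGroups, gcKeyRuns]
  | case2 p rest ih =>
    rcases List.pairwise_cons.mp hl with ⟨hp, hrest⟩
    have hrest' : (rest.dropWhile (fun q => q.2 == p.2)).Pairwise (fun a b => gcKey a ≤ gcKey b) :=
      List.Pairwise.sublist (List.dropWhile_sublist _) hrest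
    rw [gcGroups, gcKeyRuns, List.map_cons, ih hrest']
    congr 1
    · -- head group: l.filter (cls p.2) = p :: takeWhile
      rw [List.filter_cons_of_pos (by simp), takeWhile_class_eq_filter p rest hp hrest]
      rfl
    · apply List.map_congr_left
      intro r hr
      rcases List.mem_map.mp ((mem_gcKeyRuns _ r).mp hr) with ⟨q0, hq0, rfl⟩
      have hplt : gcKey p < gcKey q0 := dropWhile_key_gt p rest hp hrest q0 hq0
      have hpne : p.2 ≠ q0.2 := by
        intro hc; rw [gcKey, gcKey, hc] at hplt; exact lt_irrefl _ hplt
      congr 1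
      rw [List.filter_cons_of_neg (by simpa using hpne)]
      conv_rhs => rw [← List.takeWhile_append_dropWhile (p := fun q => q.2 == p.2) (l := rest)]
      rw [List.filter_append]
      have htw : (rest.takeWhile (fun q => q.2 == p.2)).filter (fun p => p.2 == q0.2) = [] := by
        apply List.filter_eq_nil_iff.mpr
        intro q hq
        have := List.mem_takeWhile_imp hq
        simp only [beq_iff_eq] at this ⊢
        rw [this]; exact hpne
      rw [htw, List.nil_append]

lemma keyRuns_sorted (xs : List ((String × Int) × (Int × Int))) :
    PySem.List.sorted (PySem.Set.ofList (xs.map (·.2))) (fun r => toLex r) =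
      gcKeyRuns (PySem.List.sorted xs gcKey) := by
  have hpw : (PySem.List.sorted xs gcKey).Pairwise (fun a b => gcKey a ≤ gcKey b) :=
    PySem.List.sorted_pairwise xs gcKey
  have hlt := gcKeyRuns_pairwise _ hpw
  apply PySem.List.sorted_eq_of_perm_of_pairwise_lt
  · have hnd : (gcKeyRuns (PySem.List.sorted xs gcKey)).Nodup :=
      hlt.imp (fun h => by intro hc; rw [hc] at h; exact lt_irrefl _ h)
    refine (List.perm_ext_iff_of_nodup hnd (PySem.Set.nodup_ofList _)).mpr ?_
    intro r
    rw [mem_gcKeyRuns, PySem.Set.mem_ofList]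
    constructor
    · intro h
      rcases List.mem_map.mp h with ⟨q, hq, rfl⟩
      exact List.mem_map_of_mem ((PySem.List.mem_sorted _ _ _ _).mp hq)
    · intro h
      rcases List.mem_map.mp h with ⟨q, hq, rfl⟩
      exact List.mem_map_of_mem ((PySem.List.mem_sorted _ _ _ _).mpr hq)
  · exact hlt

-- enumerating a mapped list
lemma enumerate_map {α β : Type} (l : List α) (f : α → β) (n : Int) :
    PySem.List.enumerate (l.map f) n = (PySem.List.enumerate l n).map (fun q => (q.1, f q.2)) := by
  induction l generalizing n with
  | nil => rfl
  | cons x t ih => simp [PySem.List.enumerate, ih]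

-- the whole pipeline, over the common item list
lemma gc_main (xs : List ((String × Int) × (Int × Int))) :
    (PySem.List.enumerate (PySem.List.sorted2
        ((xs.foldl (fun d p => d.modify p.2 PySem.Dict.empty (fun m => m.insert p.1.1 p.1.2))
          (PySem.Dict.empty : PySem.Dict (Int × Int) (PySem.Dict String Int))).items)
        (fun x => x.1.1) (fun x => x.1.2))).map
      (fun q => (q.1 + 1, q.2.2.items)) =
    (PySem.List.enumerate (gcGroups (PySem.List.sorted2 xs (fun p => p.2.1) (fun p => p.2.2)))).map
      (fun q => (q.1 + 1, q.2)) := by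
  rw [byRange_items xs, sorted2_eq_sorted_toLex, sorted2_eq_sorted_toLex]
  rw [show (fun x : (Int × Int) × PySem.Dict String Int => toLex (x.1.1, x.1.2)) =
        (fun x : (Int × Int) × PySem.Dict String Int => toLex x.1) from rfl]
  rw [show (fun p : (String × Int) × (Int × Int) => toLex (p.2.1, p.2.2)) = gcKey from rfl]
  rw [sorted_map_pair _ _ (PySem.Set.nodup_ofList _)]
  rw [gcGroups_eq _ (PySem.List.sorted_pairwise xs gcKey)]
  simp only [sorted_filter_class]
  rw [enumerate_map, enumerate_map, List.map_map, List.map_map, ← keyRuns_sorted]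
  rfl

-- ===== VERDICT (by name: the statement is the Claim_ definition above) =====
theorem grouped_colocation_spec : Claim_equal_grouped_colocation := by
  intro ranges _
  show grouped_colocation ranges = grouped_colocation_alt ranges
  unfold grouped_colocation grouped_colocation_alt
  exact gc_main _
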